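-- pv_equiv track=rewrite | github.com/go-hare/reachy_mini | src/ccmini/services/session_memory.py | truncate_for_compact
-- ===== SOURCE A (Python) =====
-- def truncate_for_compact(content: str, max_tokens: int = 2000) -> str:
--     """Truncate session memory sections for injection into compact summary."""
--     max_chars = max_tokens * 4
--     lines = content.split("\n")
--     output_lines: list[str] = []
--     current_section_chars = 0
--
--     for line in lines:
--         if line.startswith("# "):
--             current_section_chars = 0
--             output_lines.append(line)
--         else:
--             current_section_chars += len(line) + 1
--             if current_section_chars <= max_chars:
--                 output_lines.append(line)
--             elif not output_lines[-1].startswith("[..."):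
--                 output_lines.append("[... section truncated ...]")
--
--     return "\n".join(output_lines)
-- ===== SOURCE B (Python) =====
-- def truncate_for_compact(content: str, max_tokens: int = 2000) -> str:
--     """Truncate session memory sections for injection into compact summary."""
--     max_chars = max_tokens * 4
--     # Pass 1: partition the lines into sections (a new section at every heading;
--     # lines before the first heading form a leading section).
--     sections: list[list[str]] = []
--     for line in content.split("\n"):
--         if line.startswith("# ") or not sections:
--             sections.append([line])
--         else:
--             sections[-1].append(line)
--     # Pass 2: emit each section independently under the char budget.
--     pieces: list[str] = []
--     for sec in sections:
--         out: list[str] = []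
--         chars = 0
--         body = sec
--         if sec[0].startswith("# "):
--             out.append(sec[0])
--             body = sec[1:]
--         for line in body:
--             chars += len(line) + 1
--             if chars <= max_chars:
--                 out.append(line)
--             elif not out or not out[-1].startswith("[..."):
--                 out.append("[... section truncated ...]")
--         pieces.extend(out)
--     return "\n".join(pieces)
-- ===== Notes on version B (the rewrite author's own statement) =====
-- stated objective: alternative
-- what changed: Replaces the single stateful scan (counter reset in-flight, marker guard peeking at the global output list) by a two-phase decomposition: first partition the lines into sections at each heading line, then process every section independently with a local buffer and local budget counter, concatenating the sections' outputs.
import Mathlib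
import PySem

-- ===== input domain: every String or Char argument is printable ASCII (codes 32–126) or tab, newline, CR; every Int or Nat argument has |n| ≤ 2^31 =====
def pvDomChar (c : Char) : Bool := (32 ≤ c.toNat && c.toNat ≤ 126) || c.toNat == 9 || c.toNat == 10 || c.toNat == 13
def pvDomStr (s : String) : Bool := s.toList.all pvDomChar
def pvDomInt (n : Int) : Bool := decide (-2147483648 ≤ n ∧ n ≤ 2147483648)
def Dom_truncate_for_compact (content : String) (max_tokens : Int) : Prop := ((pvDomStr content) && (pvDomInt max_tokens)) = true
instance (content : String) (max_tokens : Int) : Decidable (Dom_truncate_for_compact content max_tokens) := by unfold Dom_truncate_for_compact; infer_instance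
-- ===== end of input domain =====

-- B restructures A's single stateful scan into partition-into-sections + per-section emission
-- (same O(n) cost, different decomposition); equivalence of the return values is proved on Pre_.

-- ===== PORT A =====
-- one step of A's loop over a line; output_lines[-1] is pyGetD with default ""
-- (the default is only reached where Python A raises IndexError, excluded by Pre_ below)
def pyAStep (max_chars : Int) (st : List String × Int) (line : String) : List String × Int :=
  if PySem.Str.startswith line "# " then
    (st.1 ++ [line], 0)
  else
    let c := st.2 + PySem.Str.len line + 1
    if c ≤ max_chars then (st.1 ++ [line], c)
    else if PySem.Str.startswith (PySem.List.pyGetD st.1 (-1) "") "[..." = false then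
      (st.1 ++ ["[... section truncated ...]"], c)
    else (st.1, c)

def truncate_for_compact (content : String) (max_tokens : Int) : String :=
  let max_chars := max_tokens * 4
  let lines := (PySem.Str.split? content "\n").getD []
  PySem.Str.join "\n" (lines.foldl (pyAStep max_chars) ([], 0)).1

-- ===== PORT B =====
def pyHeading (line : String) : Bool := PySem.Str.startswith line "# "

-- pass 1 of Source B: group lines into sections (new section at each heading)
def pySections (lines : List String) : List (List String) :=
  lines.foldl
    (fun secs line =>
      if pyHeading line || secs.isEmpty then secs ++ [[line]]
      else secs.dropLast ++ [secs.getLastD [] ++ [line]])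
    []

-- one step of Source B's inner per-section loop (local buffer st.1, local counter st.2)
def pyBStep (max_chars : Int) (st : List String × Int) (line : String) : List String × Int :=
  let c := st.2 + PySem.Str.len line + 1
  if c ≤ max_chars then (st.1 ++ [line], c)
  else if st.1.isEmpty || PySem.Str.startswith (st.1.getLastD "") "[..." = false then
    (st.1 ++ ["[... section truncated ...]"], c)
  else (st.1, c)

-- pass 2 of Source B for one section
def pyEmit (max_chars : Int) (sec : List String) : List String :=
  match sec with
  | [] => []
  | h :: rest =>
    if pyHeading h then (rest.foldl (pyBStep max_chars) ([h], 0)).1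
    else ((h :: rest).foldl (pyBStep max_chars) ([], 0)).1

def truncate_for_compact_alt (content : String) (max_tokens : Int) : String :=
  let max_chars := max_tokens * 4
  let lines := (PySem.Str.split? content "\n").getD []
  PySem.Str.join "\n" ((pySections lines).flatMap (pyEmit max_chars))

-- ===== PRECONDITION & SPEC =====
-- Pre_ excludes exactly the inputs on which Python A raises IndexError (output_lines[-1]
-- with an empty list): the first line is not a heading and already exceeds the budget.
def Pre_truncate_for_compact (content : String) (max_tokens : Int) : Prop :=
  PySem.Str.startswith (((PySem.Str.split? content "\n").getD []).headD "") "# " = true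
    ∨ PySem.Str.len (((PySem.Str.split? content "\n").getD []).headD "") + 1 ≤ max_tokens * 4

instance (content : String) (max_tokens : Int) : Decidable (Pre_truncate_for_compact content max_tokens) := by
  unfold Pre_truncate_for_compact; infer_instance

def pvWitness_truncate_for_compact : String × Int := ("a\nbb\n# H\ncc", 1)

def Spec_truncate_for_compact (content : String) (max_tokens : Int) (out : String) : Prop := out = truncate_for_compact_alt content max_tokens
instance (content : String) (max_tokens : Int) (out : String) : Decidable (Spec_truncate_for_compact content max_tokens out) := by unfold Spec_truncate_for_compact; infer_instance

-- ===== CLAIM (what is proved, stated in full; the proofs are below) =====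
def Claim_equal_truncate_for_compact : Prop := ∀ (content : String) (max_tokens : Int), Dom_truncate_for_compact content max_tokens → Pre_truncate_for_compact content max_tokens → Spec_truncate_for_compact content max_tokens (truncate_for_compact content max_tokens)

-- ===== LEMMAS AND PROOFS =====

-- recursive specification of pySections
def partRec : List String → List (List String)
  | [] => []
  | l :: rest =>
      (l :: rest.takeWhile (fun s => !pyHeading s)) :: partRec (rest.dropWhile (fun s => !pyHeading s))
termination_by ls => ls.length
decreasing_by
  have := List.length_dropWhile_le (fun s => !pyHeading s) rest
  simp; omega

lemma startswith_empty_bracket : PySem.Str.startswith "" "[..." = false := by decide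

lemma heading_not_bracket (l : String) (h : pyHeading l = true) :
    PySem.Str.startswith l "[..." = false := by
  unfold pyHeading at h
  rw [PySem.Str.startswith_eq] at *
  rw [Bool.eq_false_iff]
  intro hb
  rw [PySem.Chars.startswith_iff] at h hb
  obtain ⟨t1, h1⟩ := h; obtain ⟨t2, h2⟩ := hb
  simp at h1 h2
  rw [← h1] at h2
  simp at h2

lemma pyGetD_neg_one_getLastD (xs : List String) :
    PySem.List.pyGetD xs (-1) "" = xs.getLastD "" := by
  rcases List.eq_nil_or_concat xs with rfl | ⟨ys, x, rfl⟩
  · decide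
  · rw [List.concat_eq_append, PySem.List.pyGetD_neg_one_append_singleton, List.getLastD_concat]

-- one-step agreement between A's step and B's local step
lemma step_agree (mc : Int) (line : String) (hline : pyHeading line = false)
    (pre lout : List String) (c : Int)
    (hpre : PySem.Str.startswith (pre.getLastD "") "[..." = false) :
    pyAStep mc (pre ++ lout, c) line
      = (pre ++ (pyBStep mc (lout, c) line).1, (pyBStep mc (lout, c) line).2) := by
  unfold pyHeading at hline
  unfold pyAStep pyBStep
  simp only [hline, Bool.false_eq_true, if_false]
  rcases List.eq_nil_or_concat lout with rfl | ⟨ys, x, rfl⟩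
  · simp only [List.append_nil, List.isEmpty_nil, pyGetD_neg_one_getLastD, hpre]
    split_ifs <;> simp_all
  · simp only [List.concat_eq_append, ← List.append_assoc,
      PySem.List.pyGetD_neg_one_append_singleton, List.getLastD_concat]
    split_ifs <;> simp_all

-- B's local loop shifts over a fixed safe prefix
lemma stepB_agree (mc : Int) (line : String)
    (pre lout : List String) (c : Int)
    (hpre : PySem.Str.startswith (pre.getLastD "") "[..." = false) :
    pyBStep mc (pre ++ lout, c) line
      = (pre ++ (pyBStep mc (lout, c) line).1, (pyBStep mc (lout, c) line).2) := by
  unfold pyBStep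
  rcases List.eq_nil_or_concat lout with rfl | ⟨ys, x, rfl⟩
  · simp only [List.append_nil, List.isEmpty_nil, List.getLastD_nil]
    rcases List.eq_nil_or_concat pre with rfl | ⟨zs, y, rfl⟩
    · split_ifs <;> simp_all
    · simp only [List.concat_eq_append, List.getLastD_concat] at *
      split_ifs <;> simp_all
  · simp only [List.concat_eq_append, ← List.append_assoc, List.getLastD_concat]
    split_ifs <;> simp_all

lemma loop_agree (mc : Int) (tail : List String)
    (hnh : ∀ l ∈ tail, pyHeading l = false) :
    ∀ (pre lout : List String) (c : Int),
      PySem.Str.startswith (pre.getLastD "") "[..." = false →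
      tail.foldl (pyAStep mc) (pre ++ lout, c)
        = (pre ++ (tail.foldl (pyBStep mc) (lout, c)).1, (tail.foldl (pyBStep mc) (lout, c)).2) := by
  induction tail with
  | nil => intro pre lout c _; simp
  | cons t ts ih =>
    intro pre lout c hpre
    have ht := hnh t (by simp)
    have hts : ∀ l ∈ ts, pyHeading l = false := fun l hl => hnh l (by simp [hl])
    simp only [List.foldl_cons]
    rw [step_agree mc t ht pre lout c hpre]
    have := ih hts pre (pyBStep mc (lout, c) t).1 (pyBStep mc (lout, c) t).2 hpre
    simpa using this

lemma loopB_shift (mc : Int) (tail : List String) :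
    ∀ (pre lout : List String) (c : Int),
      PySem.Str.startswith (pre.getLastD "") "[..." = false →
      tail.foldl (pyBStep mc) (pre ++ lout, c)
        = (pre ++ (tail.foldl (pyBStep mc) (lout, c)).1, (tail.foldl (pyBStep mc) (lout, c)).2) := by
  induction tail with
  | nil => intro pre lout c _; simp
  | cons t ts ih =>
    intro pre lout c hpre
    simp only [List.foldl_cons]
    rw [stepB_agree mc t pre lout c hpre]
    have := ih pre (pyBStep mc (lout, c) t).1 (pyBStep mc (lout, c) t).2 hpre
    simpa using this

-- the first line after a dropWhile of non-headings is a heading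
lemma drop_head_heading (rest : List String) (h : String) (t : List String)
    (he : rest.dropWhile (fun s => !pyHeading s) = h :: t) : pyHeading h = true := by
  have hne : rest.dropWhile (fun s => !pyHeading s) ≠ [] := by simp [he]
  have h2 := List.head_dropWhile_not (fun s => !pyHeading s) hne
  simp only [he, List.head_cons] at h2
  simpa using h2

-- A's fold over a list of lines starting with a heading equals the per-section emission
lemma sec_lemma (mc : Int) : ∀ (n : Nat) (ls : List String), ls.length ≤ n →
    (∀ h t, ls = h :: t → pyHeading h = true) →
    ∀ (out : List String) (c : Int),
      (ls.foldl (pyAStep mc) (out, c)).1 = out ++ (partRec ls).flatMap (pyEmit mc) := by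
  intro n
  induction n with
  | zero =>
    intro ls hlen _ out c
    have : ls = [] := List.length_eq_zero_iff.mp (Nat.le_zero.mp hlen)
    subst this; simp [partRec]
  | succ m ih =>
    intro ls hlen hhead out c
    match ls with
    | [] => simp [partRec]
    | l :: rest =>
      have hl : pyHeading l = true := hhead l rest rfl
      set t1 := rest.takeWhile (fun s => !pyHeading s) with ht1
      set r := rest.dropWhile (fun s => !pyHeading s) with hr
      have hsplit : rest = t1 ++ r := (List.takeWhile_append_dropWhile).symm
      have hstep : pyAStep mc (out, c) l = (out ++ [l], 0) := by
        unfold pyAStep; unfold pyHeading at hl; rw [hl]; simp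
      have hnh1 : ∀ x ∈ t1, pyHeading x = false := by
        intro x hx
        have := List.mem_takeWhile_imp hx
        simpa using this
      have hpre1 : PySem.Str.startswith ((out ++ [l]).getLastD "") "[..." = false := by
        rw [List.getLastD_concat]; exact heading_not_bracket l hl
      have hloop := loop_agree mc t1 hnh1 (out ++ [l]) [] 0 hpre1
      simp only [List.append_nil] at hloop
      have hrhead : ∀ h t, r = h :: t → pyHeading h = true := by
        intro h t he
        rw [hr] at he
        exact drop_head_heading rest h t he
      have hrlen : r.length ≤ m := by
        rw [hr]
        have h1 := List.length_dropWhile_le (fun s => !pyHeading s) rest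
        simp only [List.length_cons] at hlen
        omega
      have hemit : pyEmit mc (l :: t1) = [l] ++ (t1.foldl (pyBStep mc) ([], 0)).1 := by
        simp only [pyEmit, hl, if_true]
        have := loopB_shift mc t1 [l] [] 0 (by simpa using heading_not_bracket l hl)
        simp only [List.append_nil] at this
        rw [this]
      calc ((l :: rest).foldl (pyAStep mc) (out, c)).1
          = ((t1 ++ r).foldl (pyAStep mc) (out ++ [l], 0)).1 := by
            rw [List.foldl_cons, hstep, ← hsplit]
        _ = (r.foldl (pyAStep mc) (out ++ [l] ++ (t1.foldl (pyBStep mc) ([], 0)).1,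
              (t1.foldl (pyBStep mc) ([], 0)).2)).1 := by
            rw [List.foldl_append, hloop]
        _ = out ++ [l] ++ (t1.foldl (pyBStep mc) ([], 0)).1 ++ (partRec r).flatMap (pyEmit mc) := by
            rw [ih r hrlen hrhead]
        _ = out ++ (partRec (l :: rest)).flatMap (pyEmit mc) := by
            rw [show partRec (l :: rest) = (l :: t1) :: partRec r from by rw [partRec]]
            rw [List.flatMap_cons, hemit]
            simp

-- pySections computes partRec
lemma part_acc (ls : List String) : ∀ (gs : List (List String)) (g : List String), g ≠ [] →
    ls.foldl
      (fun secs line =>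
        if pyHeading line || secs.isEmpty then secs ++ [[line]]
        else secs.dropLast ++ [secs.getLastD [] ++ [line]])
      (gs ++ [g])
    = gs ++ ((g ++ ls.takeWhile (fun s => !pyHeading s)) :: partRec (ls.dropWhile (fun s => !pyHeading s))) := by
  induction ls with
  | nil => intro gs g hg; simp [partRec]
  | cons l ls' ih =>
    intro gs g hg
    rcases hH : pyHeading l with _|_
    · simp only [List.foldl_cons, hH, Bool.false_or]
      rw [if_neg (by simp)]
      rw [List.dropLast_concat, List.getLastD_concat]
      rw [ih gs (g ++ [l]) (by simp)]
      simp [hH]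
    · simp only [List.foldl_cons, hH, Bool.true_or, if_true]
      rw [show gs ++ [g] ++ [[l]] = (gs ++ [g]) ++ [[l]] from by simp]
      rw [ih (gs ++ [g]) [l] (by simp)]
      simp only [List.takeWhile_cons, List.dropWhile_cons, hH]
      simp [partRec]

lemma pySections_eq_partRec (ls : List String) : pySections ls = partRec ls := by
  match ls with
  | [] => simp [pySections, partRec]
  | l :: ls' =>
    unfold pySections
    have h0 : (if pyHeading l || (List.isEmpty ([] : List (List String))) then ([] : List (List String)) ++ [[l]] else ([] : List (List String)).dropLast ++ [List.getLastD [] [] ++ [l]]) = [[l]] := by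
      simp
    simp only [List.foldl_cons, h0]
    rw [show ([[l]] : List (List String)) = [] ++ [[l]] from rfl]
    rw [part_acc ls' [] [l] (by simp)]
    simp [partRec]

lemma main_lemma (mc : Int) (ls : List String) :
    (ls.foldl (pyAStep mc) ([], 0)).1 = (pySections ls).flatMap (pyEmit mc) := by
  rw [pySections_eq_partRec]
  match ls with
  | [] => simp [partRec]
  | l :: rest =>
    rcases hH : pyHeading l with _|_
    · set t1 := rest.takeWhile (fun s => !pyHeading s) with ht1
      set r := rest.dropWhile (fun s => !pyHeading s) with hr
      have hsplit : l :: rest = (l :: t1) ++ r := by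
        rw [List.cons_append]
        congr 1
        rw [ht1, hr, List.takeWhile_append_dropWhile]
      have hnh : ∀ x ∈ l :: t1, pyHeading x = false := by
        intro x hx
        rcases List.mem_cons.mp hx with rfl | hx
        · exact hH
        · rw [ht1] at hx; simpa using List.mem_takeWhile_imp hx
      have hloop := loop_agree mc (l :: t1) hnh [] [] 0 startswith_empty_bracket
      simp only [List.append_nil, List.nil_append] at hloop
      have hrhead : ∀ h t, r = h :: t → pyHeading h = true := by
        intro h t he; rw [hr] at he; exact drop_head_heading rest h t he
      calc ((l :: rest).foldl (pyAStep mc) ([], 0)).1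
          = (r.foldl (pyAStep mc) (((l :: t1).foldl (pyBStep mc) ([], 0)).1,
              ((l :: t1).foldl (pyBStep mc) ([], 0)).2)).1 := by
            rw [hsplit, List.foldl_append, hloop]
        _ = ((l :: t1).foldl (pyBStep mc) ([], 0)).1 ++ (partRec r).flatMap (pyEmit mc) := by
            rw [sec_lemma mc r.length r le_rfl hrhead]
        _ = (partRec (l :: rest)).flatMap (pyEmit mc) := by
            rw [show partRec (l :: rest) = (l :: t1) :: partRec r from by rw [partRec]]
            rw [List.flatMap_cons]
            congr 1
            simp [pyEmit, hH]
    · have := sec_lemma mc (l :: rest).length (l :: rest) le_rfl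
        (by intro h t he; injection he with h1 _; subst h1; exact hH) [] 0
      simpa using this

-- ===== VERDICT (by name: the statement is the Claim_ definition above) =====
theorem truncate_for_compact_spec : Claim_equal_truncate_for_compact := by
  intro content max_tokens _ _
  unfold Spec_truncate_for_compact truncate_for_compact truncate_for_compact_alt
  exact congrArg (PySem.Str.join "\n") (main_lemma _ _)
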